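-- pv_equiv track=rewrite | github.com/riyapatel13/RSA | RSA decryption algorithm.py | decode_int
-- ===== SOURCE A (Python) =====
-- def decode_int(n):
--     alphabet = [' ','a','b','c','d','e','f','g','h','i','j','k','l','m','n','o','p','q','r','s','t','u','v','w','x','y','z']
--     dec_list = []
--     while n > 0:
--         dec_list.append(alphabet[n%27])
--         n //= 27
--     dec_list.reverse()
--
--     res = ""
--     for i in dec_list:
--         res += i
--     return res
-- ===== SOURCE B (Python) =====
-- def decode_int(n):
--     alphabet = [' ','a','b','c','d','e','f','g','h','i','j','k','l','m','n','o','p','q','r','s','t','u','v','w','x','y','z']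
--     if n <= 0:
--         return ''
--     return decode_int(n // 27) + alphabet[n % 27]
-- ===== Notes on version B (the rewrite author's own statement) =====
-- stated objective: simpler
-- what changed: Replaces the while-loop that collects digits least-significant-first, reverses the list and concatenates in a second loop by a direct recursion that builds the string most-significant-digit-first with no list, reverse or join loop.
import Mathlib
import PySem

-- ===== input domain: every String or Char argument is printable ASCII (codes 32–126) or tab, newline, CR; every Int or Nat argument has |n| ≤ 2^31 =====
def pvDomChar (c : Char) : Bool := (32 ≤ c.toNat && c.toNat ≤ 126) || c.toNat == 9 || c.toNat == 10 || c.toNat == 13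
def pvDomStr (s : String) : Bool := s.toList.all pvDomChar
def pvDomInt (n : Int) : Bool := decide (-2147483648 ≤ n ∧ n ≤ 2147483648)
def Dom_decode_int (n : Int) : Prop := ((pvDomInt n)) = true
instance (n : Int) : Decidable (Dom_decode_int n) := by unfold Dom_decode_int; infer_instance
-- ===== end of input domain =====

-- B replaces A's loop+reverse+join by a direct most-significant-first recursion (same values, no speed claim).
-- ===== PORT A =====
def pvAlphabet : List String := [" ","a","b","c","d","e","f","g","h","i","j","k","l","m","n","o","p","q","r","s","t","u","v","w","x","y","z"]

-- the while loop of A: collects alphabet[n%27] least-significant-first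
def pvDecList (n : Int) : List String :=
  if h : n > 0 then
    ((PySem.List.pyGet? pvAlphabet (PySem.Int.mod n 27)).getD " ") :: pvDecList (PySem.Int.floordiv n 27)
  else []
  termination_by n.toNat
  decreasing_by
    have h27 : (0:Int) < 27 := by norm_num
    rw [PySem.Int.floordiv_eq_ediv_of_pos h27]
    omega

def decode_int (n : Int) : String :=
  let dec_list := (pvDecList n).reverse
  dec_list.foldl (fun res i => res ++ i) ""

-- ===== PORT B =====
def decode_int_alt (n : Int) : String :=
  if h : n ≤ 0 then ""
  else decode_int_alt (PySem.Int.floordiv n 27) ++ ((PySem.List.pyGet? pvAlphabet (PySem.Int.mod n 27)).getD " ")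
  termination_by n.toNat
  decreasing_by
    have h27 : (0:Int) < 27 := by norm_num
    rw [PySem.Int.floordiv_eq_ediv_of_pos h27]
    omega

-- ===== PRECONDITION & SPEC =====
def Spec_decode_int (n : Int) (out : String) : Prop := out = decode_int_alt n
instance (n : Int) (out : String) : Decidable (Spec_decode_int n out) := by unfold Spec_decode_int; infer_instance

-- ===== CLAIM (what is proved, stated in full; the proofs are below) =====
def Claim_equal_decode_int : Prop := ∀ (n : Int), Dom_decode_int n → Spec_decode_int n (decode_int n)

-- ===== LEMMAS AND PROOFS =====

-- ===== VERDICT (by name: the statement is the Claim_ definition above) =====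
theorem pvKey (n : Int) :
    ((pvDecList n).reverse).foldl (fun res i => res ++ i) "" = decode_int_alt n := by
  by_cases h : n > 0
  · rw [pvDecList, dif_pos h]
    rw [decode_int_alt, dif_neg (by omega)]
    rw [List.reverse_cons, List.foldl_append]
    rw [pvKey (PySem.Int.floordiv n 27)]
    rfl
  · rw [pvDecList, dif_neg h, decode_int_alt, dif_pos (by omega)]
    rfl
  termination_by n.toNat
  decreasing_by
    have h27 : (0:Int) < 27 := by norm_num
    rw [PySem.Int.floordiv_eq_ediv_of_pos h27]
    omega

theorem decode_int_spec : Claim_equal_decode_int := by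
  intro n _
  unfold Spec_decode_int decode_int
  exact pvKey n
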